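-- pv_equiv track=rewrite | github.com/keing1/advent-of-code-2020 | day_17/conway_cubes.py | pad_flat_input
-- ===== SOURCE A (Python) =====
-- def pad_flat_input(cube_input, padding_num):
-- 	num_rows = len(cube_input)
-- 	num_cols = len(cube_input[0])
--
-- 	updated_input_rows = [(['.'] * padding_num + inp_row + ['.'] * padding_num)
-- 		for inp_row in cube_input]
--
-- 	input_plane = [['.' for col in range(num_cols + 2*padding_num)]
-- 		for row in range(padding_num)] + updated_input_rows + \
-- 		[['.' for col in range(num_cols + 2*padding_num)]
-- 		for row in range(padding_num)]
--
-- 	final_space = [[['.'] * (2 * padding_num + num_cols)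
-- 		for r in range(2*padding_num+num_rows)] for p in range(padding_num)] + \
-- 		[input_plane] + \
-- 		[[['.'] * (2 * padding_num + num_cols)
-- 		for r in range(2*padding_num+num_rows)] for p in range(padding_num)]
--
-- 	return final_space
-- ===== SOURCE B (Python) =====
-- def pad_flat_input(cube_input, padding_num):
--     pad = max(padding_num, 0)
--     num_rows = len(cube_input)
--     num_cols = len(cube_input[0])
--     height = 2 * pad + num_rows
--     return [
--         [(['.'] * pad + cube_input[r - pad] + ['.'] * pad)
--          if p == pad and pad <= r < pad + num_rows
--          else ['.'] * (2 * pad + num_cols)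
--          for r in range(height)]
--         for p in range(2 * pad + 1)
--     ]
-- ===== Notes on version B (the rewrite author's own statement) =====
-- stated objective: simpler
-- what changed: Replaces A's slab concatenation (blank planes ++ [pad-rows ++ padded input rows ++ pad-rows] ++ blank planes) by one coordinate-driven double comprehension over (plane,row) that emits a padded input row exactly when plane == pad and the row index falls in the input band, and a blank row otherwise.
import Mathlib
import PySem

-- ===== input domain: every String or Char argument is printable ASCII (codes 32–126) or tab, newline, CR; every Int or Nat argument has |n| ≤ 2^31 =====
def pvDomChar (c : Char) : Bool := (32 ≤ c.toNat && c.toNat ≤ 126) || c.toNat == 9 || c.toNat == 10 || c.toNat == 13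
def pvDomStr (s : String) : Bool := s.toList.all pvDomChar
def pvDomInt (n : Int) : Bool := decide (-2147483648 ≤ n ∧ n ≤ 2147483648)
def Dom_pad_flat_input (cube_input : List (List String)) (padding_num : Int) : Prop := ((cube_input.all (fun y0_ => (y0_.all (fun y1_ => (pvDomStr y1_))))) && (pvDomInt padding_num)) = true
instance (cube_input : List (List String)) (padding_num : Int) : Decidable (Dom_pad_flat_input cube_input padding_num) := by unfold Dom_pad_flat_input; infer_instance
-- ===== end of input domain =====

-- B assembles the padded 3D grid by a single coordinate-driven comprehension over (plane,row)
-- instead of A's concatenation of blank slabs around a middle plane; same cost, simpler shape.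
-- Note: Python's list*k and range(k) give [] for k < 0; Int.toNat clamps the same way, so the
-- ports below use .toNat exactly where the Python multiplies/ranges an int.

-- ===== PORT A =====
def pad_flat_input (cube_input : List (List String)) (padding_num : Int) : List (List (List String)) :=
  let num_rows : Int := cube_input.length
  -- num_cols = len(cube_input[0]); on [] Python raises IndexError (excluded by Pre_)
  let num_cols : Int := ((cube_input.headD []).length : Int)
  let updated_input_rows : List (List String) :=
    cube_input.map (fun inp_row =>
      List.replicate padding_num.toNat "." ++ inp_row ++ List.replicate padding_num.toNat ".")
  let input_plane : List (List String) :=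
    (List.range padding_num.toNat).map (fun _ => List.replicate (num_cols + 2 * padding_num).toNat ".")
    ++ updated_input_rows
    ++ (List.range padding_num.toNat).map (fun _ => List.replicate (num_cols + 2 * padding_num).toNat ".")
  let final_space : List (List (List String)) :=
    (List.range padding_num.toNat).map (fun _ =>
      (List.range (2 * padding_num + num_rows).toNat).map (fun _ =>
        List.replicate (2 * padding_num + num_cols).toNat "."))
    ++ [input_plane]
    ++ (List.range padding_num.toNat).map (fun _ =>
      (List.range (2 * padding_num + num_rows).toNat).map (fun _ =>
        List.replicate (2 * padding_num + num_cols).toNat "."))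
  final_space

-- ===== PORT B =====
def pad_flat_input_alt (cube_input : List (List String)) (padding_num : Int) : List (List (List String)) :=
  let pad : Int := max padding_num 0
  let num_rows : Int := cube_input.length
  -- num_cols = len(cube_input[0]); on [] Python raises IndexError (excluded by Pre_)
  let num_cols : Int := ((cube_input.headD []).length : Int)
  let height : Int := 2 * pad + num_rows
  (List.range (2 * pad + 1).toNat).map (fun p =>
    (List.range height.toNat).map (fun r =>
      if p = pad.toNat ∧ pad.toNat ≤ r ∧ r < pad.toNat + cube_input.length then
        List.replicate pad.toNat "." ++ cube_input.getD (r - pad.toNat) [] ++ List.replicate pad.toNat "."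
      else
        List.replicate (2 * pad + num_cols).toNat "."))

-- ===== PRECONDITION & SPEC =====
-- Pre_ excludes only the empty grid, on which both A and B raise IndexError at len(cube_input[0]).
def Pre_pad_flat_input (cube_input : List (List String)) (padding_num : Int) : Prop := cube_input ≠ []
instance (cube_input : List (List String)) (padding_num : Int) : Decidable (Pre_pad_flat_input cube_input padding_num) := by unfold Pre_pad_flat_input; infer_instance
def pvWitness_pad_flat_input : List (List String) × Int := ([["#", "."], [".", "#"]], 1)

def Spec_pad_flat_input (cube_input : List (List String)) (padding_num : Int) (out : List (List (List String))) : Prop := out = pad_flat_input_alt cube_input padding_num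
instance (cube_input : List (List String)) (padding_num : Int) (out : List (List (List String))) : Decidable (Spec_pad_flat_input cube_input padding_num out) := by unfold Spec_pad_flat_input; infer_instance

-- ===== CLAIM (what is proved, stated in full; the proofs are below) =====
def Claim_equal_pad_flat_input : Prop := ∀ (cube_input : List (List String)) (padding_num : Int), Dom_pad_flat_input cube_input padding_num → Pre_pad_flat_input cube_input padding_num → Spec_pad_flat_input cube_input padding_num (pad_flat_input cube_input padding_num)

-- ===== LEMMAS AND PROOFS =====


-- split a map over range (k + n + k) into three slabs
theorem range_split {α : Type} (k n : Nat) (f : Nat → α) :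
    (List.range (k + n + k)).map f
      = (List.range k).map f ++ (List.range n).map (fun i => f (k + i))
        ++ (List.range k).map (fun i => f (k + n + i)) := by
  simp [List.range_add, Function.comp_def, List.append_assoc]

theorem map_range_getD {α : Type} (xs : List α) (d : α) :
    (List.range xs.length).map (fun i => xs.getD i d) = xs := by
  apply List.ext_getElem
  · simp
  · intro i h1 h2
    simp [List.getD_eq_getElem?_getD, List.getElem?_eq_getElem h2]

theorem pad_flat_input_spec : Claim_equal_pad_flat_input := by
  intro cube padding _ _
  show pad_flat_input cube padding = pad_flat_input_alt cube padding
  by_cases h : 0 ≤ padding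
  · obtain ⟨k, rfl⟩ : ∃ k : Nat, padding = (k : Int) :=
      ⟨padding.toNat, (Int.toNat_of_nonneg h).symm⟩
    simp only [pad_flat_input, pad_flat_input_alt]
    have hmax : max (k : Int) 0 = (k : Int) := by omega
    have h1 : ((k : Int)).toNat = k := by omega
    have h2 : (((cube.headD []).length : Int) + 2 * (k : Int)).toNat
        = 2 * k + (cube.headD []).length := by omega
    have h3 : (2 * (k : Int) + ((cube.headD []).length : Int)).toNat
        = 2 * k + (cube.headD []).length := by omega
    have h4 : (2 * (k : Int) + (cube.length : Int)).toNat = 2 * k + cube.length := by omega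
    have h5 : (2 * (k : Int) + 1).toNat = 2 * k + 1 := by omega
    simp only [hmax, h1, h2, h3, h4, h5]
    have e1 : 2 * k + 1 = k + 1 + k := by omega
    have e2 : 2 * k + cube.length = k + cube.length + k := by omega
    rw [e1, e2, range_split, range_split]
    congr 1
    · congr 1
      · -- front blank planes
        refine List.map_congr_left (fun p hp => ?_)
        have hp' : p < k := List.mem_range.mp hp
        refine Eq.trans ?_ (List.map_congr_left (fun r _ => (if_neg (by omega : ¬ (p = k ∧ k ≤ r ∧ r < k + cube.length))))).symm
        simp [List.map_const', List.replicate_append_replicate]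
      · -- middle plane (plane index k)
        rw [List.range_one, List.map_cons, List.map_nil]
        congr 1
        rw [range_split]
        congr 1
        · congr 1
          · -- top blank rows
            refine (List.map_congr_left (fun r hr => ?_)).symm
            have hr' : r < k := List.mem_range.mp hr
            rw [if_neg (by omega)]
          · -- the input rows land at row indices k + i
            conv_lhs => rw [← map_range_getD cube ([] : List String), List.map_map]
            refine List.map_congr_left (fun i hi => ?_)
            have hi' : i < cube.length := List.mem_range.mp hi
            simp only [Function.comp_apply]
            rw [if_pos (by omega)]
            have hki : k + i - k = i := by omega
            rw [hki]
        · -- bottom blank rows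
          refine (List.map_congr_left (fun r _ => ?_)).symm
          rw [if_neg (by omega)]
    · -- back blank planes
      refine List.map_congr_left (fun p _ => ?_)
      refine Eq.trans ?_ (List.map_congr_left (fun r _ => (if_neg (by omega : ¬ (k + 1 + p = k ∧ k ≤ r ∧ r < k + cube.length))))).symm
      simp [List.map_const', List.replicate_append_replicate]
  · -- padding < 0: Python's list*k and range(k) are empty, both sides are [cube_input]
    simp only [pad_flat_input, pad_flat_input_alt]
    have hmax : max padding 0 = 0 := by omega
    have ht : padding.toNat = 0 := by omega
    have h5 : ((2 : Int) * 0 + 1).toNat = 1 := by omega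
    have h4 : ((2 : Int) * 0 + (cube.length : Int)).toNat = cube.length := by omega
    simp only [hmax, ht, h5, h4, List.range_zero, List.map_nil, List.replicate_zero,
      List.nil_append, List.append_nil, List.range_one, List.map_cons]
    rw [List.map_id']
    congr 1
    conv_lhs => rw [← map_range_getD cube ([] : List String)]
    refine List.map_congr_left (fun r hr => ?_)
    have hr' : r < cube.length := List.mem_range.mp hr
    rw [if_pos (by omega)]
    simp
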